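-- pv_equiv track=rewrite | github.com/liadbiz/Leetcode-Solutions | src/python/greedy_algorithm/score_after_flipping_matrix.py | matrixScore2
-- ===== SOURCE A (Python) =====
-- def matrixScore2(A):
--     """
--     :type A: List[List[int]]
--     :rtype: int
--     """
--     r = len(A)  # row lenth
--     c = len(A[0]) # column length
--     res = (1 <<(c - 1)) * r # every first item of each row should be 1
--     for j in range(1, c):
--         num = sum(A[i][j] == A[i][0] for i in range(r))
--         res += max(r - num, num) * (1 << (c - j - 1))
--     return res
-- ===== SOURCE B (Python) =====
-- def matrixScore2(A):
--     r = len(A)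
--     c = len(A[0])
--     # phase 1 (row flips): normalize so every row starts with 1
--     M = [[1 if x == row[0] else 0 for x in row[:c]] for row in A]
--     # phase 2 (column flips): flip any column with more zeros than ones
--     for j in range(c):
--         ones = sum(row[j] for row in M)
--         if ones * 2 < r:
--             for row in M:
--                 row[j] = 1 - row[j]
--     # phase 3: read off the score row by row
--     res = 0
--     for row in M:
--         val = 0
--         for b in row:
--             val = val * 2 + b
--         res += val
--     return res
-- ===== Notes on version B (the rewrite author's own statement) =====
-- stated objective: alternative
-- what changed: B actually performs the greedy flips and reads the score off the flipped matrix: it builds the row-normalised 0/1 matrix, then mutates it column by column (flipping any column with more zeros than ones via row[j] = 1 - row[j]), and finally sums each row's binary value by Horner's rule, instead of A's closed-form column-0 term plus per-column max(num, r-num) weight arithmetic with no flipping.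
-- outside the precondition, e.g. on matrixScore2([[1], []]): A returns 2, B raises IndexError
import Mathlib
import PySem

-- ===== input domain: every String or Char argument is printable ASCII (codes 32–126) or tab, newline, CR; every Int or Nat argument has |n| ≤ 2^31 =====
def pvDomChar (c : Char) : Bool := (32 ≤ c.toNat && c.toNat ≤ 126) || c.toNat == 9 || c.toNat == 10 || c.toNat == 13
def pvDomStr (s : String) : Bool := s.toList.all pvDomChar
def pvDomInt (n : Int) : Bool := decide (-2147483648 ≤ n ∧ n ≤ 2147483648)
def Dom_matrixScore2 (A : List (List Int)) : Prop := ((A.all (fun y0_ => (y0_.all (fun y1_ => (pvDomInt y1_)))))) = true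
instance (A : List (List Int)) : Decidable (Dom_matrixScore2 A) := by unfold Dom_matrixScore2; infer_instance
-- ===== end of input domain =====

-- B performs the greedy flips for real (normalise rows, flip deficient columns in place,
-- read the score off the flipped matrix by Horner's rule per row) instead of A's
-- flip-free max(num, r-num) weight arithmetic; same cost (objective: alternative).
-- B mutates only its own fresh matrix; neither program mutates the argument.

-- ===== PORT A =====
-- Indices used by A are nonnegative and, under Pre_, always in range, so getD is exact there.
def matrixScore2 (A : List (List Int)) : Int :=
  let r : Nat := A.length
  let c : Nat := (A.headD []).length          -- len(A[0]); Python raises IndexError on A = [], excluded by Pre_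
  let res : Int := (2 : Int) ^ (c - 1) * r    -- (1 << (c-1)) * r; Python raises ValueError when c = 0, excluded by Pre_
  (List.range' 1 (c - 1)).foldl (fun res j =>
    let num : Int := (List.range r).foldl (fun s i =>
      let row := A.getD i []
      s + (if row.getD j 0 == row.getD 0 0 then (1 : Int) else 0)) 0
    res + max ((r : Int) - num) num * (2 : Int) ^ (c - j - 1)) res

-- ===== PORT B =====
def matrixScore2_alt (A : List (List Int)) : Int :=
  let r : Nat := A.length
  let c : Nat := (A.headD []).length
  -- phase 1 (row flips): normalise so every row starts with 1
  let M0 : List (List Int) :=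
    A.map (fun row => (row.take c).map (fun x => if x == row.headD 0 then (1 : Int) else 0))
  -- phase 2 (column flips): flip any column with more zeros than ones (row[j] = 1 - row[j])
  let M := (List.range c).foldl (fun M j =>
      let ones : Int := (M.map (fun row => row.getD j 0)).sum
      if ones * 2 < (r : Int) then M.map (fun row => row.set j (1 - row.getD j 0)) else M) M0
  -- phase 3: read off the score row by row
  M.foldl (fun res row => res + row.foldl (fun v b => v * 2 + b) 0) 0

-- ===== PRECONDITION & SPEC =====
-- Pre_ excludes the empty matrix and an empty first row (A raises IndexError/ValueError there)
-- and ragged matrices with a row shorter than the first row: A raises IndexError on those too,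
-- except in the degenerate case of a first row of length 1 with empty later rows, where A's
-- value ignores the malformed rows while B's phase-2 column scan raises IndexError.
def Pre_matrixScore2 (A : List (List Int)) : Prop :=
  A ≠ [] ∧ 1 ≤ (A.headD []).length ∧ ∀ row ∈ A, (A.headD []).length ≤ row.length
instance (A : List (List Int)) : Decidable (Pre_matrixScore2 A) := by
  unfold Pre_matrixScore2; infer_instance

def pvWitness_matrixScore2 : List (List Int) := [[0, 1, 1], [1, 0, 1]]

def Spec_matrixScore2 (A : List (List Int)) (out : Int) : Prop := out = matrixScore2_alt A
instance (A : List (List Int)) (out : Int) : Decidable (Spec_matrixScore2 A out) := by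
  unfold Spec_matrixScore2; infer_instance

-- ===== CLAIM (what is proved, stated in full; the proofs are below) =====
def Claim_equal_matrixScore2 : Prop :=
  ∀ (A : List (List Int)), Dom_matrixScore2 A → Pre_matrixScore2 A →
    Spec_matrixScore2 A (matrixScore2 A)

-- ===== LEMMAS AND PROOFS =====

-- the common column score both programs compute
def pvCnt (A : List (List Int)) (j : Nat) : Int :=
  (A.map (fun row => if row.getD j 0 == row.getD 0 0 then (1 : Int) else 0)).sum

def pvTerm (A : List (List Int)) (c j : Nat) : Int :=
  max (pvCnt A j) ((A.length : Int) - pvCnt A j) * (2 : Int) ^ (c - 1 - j)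

def pvColSum (M : List (List Int)) (j : Nat) : Int :=
  (M.map (fun row => row.getD j 0)).sum

theorem pvHeadD_getD (l : List Int) : l.headD 0 = l.getD 0 0 := by
  cases l <;> rfl

theorem pvMapRangeGetD {β : Type} (f : List Int → β) (l : List (List Int)) :
    (List.range l.length).map (fun i => f (l.getD i [])) = l.map f := by
  apply List.ext_getElem
  · simp
  · intro i h1 h2
    simp only [List.length_map] at h2
    simp [List.getD_eq_getElem?_getD, List.getElem?_eq_getElem h2]

theorem pvCnt_zero (A : List (List Int)) : pvCnt A 0 = (A.length : Int) := by
  unfold pvCnt; simp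

-- ===== A-side characterisation =====
theorem pvA_eq (A : List (List Int)) :
    matrixScore2 A =
      (2 : Int) ^ ((A.headD []).length - 1) * A.length +
        ((List.range' 1 ((A.headD []).length - 1)).map
          (fun j => pvTerm A (A.headD []).length j)).sum := by
  have hnum : ∀ j : Nat,
      (List.range A.length).foldl (fun s i =>
        let row := A.getD i []
        s + (if row.getD j 0 == row.getD 0 0 then (1 : Int) else 0)) 0 = pvCnt A j := by
    intro j
    have h := PySem.List.foldl_add (List.range A.length)
      (fun i => if (A.getD i []).getD j 0 == (A.getD i []).getD 0 0 then (1 : Int) else 0) 0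
    refine h.trans ?_
    rw [pvMapRangeGetD (fun row => if row.getD j 0 == row.getD 0 0 then (1 : Int) else 0) A]
    simp [pvCnt]
  have h := PySem.List.foldl_add (List.range' 1 ((A.headD []).length - 1))
    (fun j =>
      max ((A.length : Int) - pvCnt A j) (pvCnt A j) *
        (2 : Int) ^ ((A.headD []).length - j - 1))
    ((2 : Int) ^ ((A.headD []).length - 1) * A.length)
  refine Eq.trans ?_ (h.trans ?_)
  · show (List.range' 1 ((A.headD []).length - 1)).foldl _ _ = _
    have hcong : ∀ (acc : Int), ∀ j ∈ List.range' 1 ((A.headD []).length - 1),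
        (fun (res : Int) (j : Nat) =>
          let num : Int := (List.range A.length).foldl (fun s i =>
            let row := A.getD i []
            s + (if row.getD j 0 == row.getD 0 0 then (1 : Int) else 0)) 0
          res + max ((A.length : Int) - num) num *
            (2 : Int) ^ ((A.headD []).length - j - 1)) acc j
        = acc + max ((A.length : Int) - pvCnt A j) (pvCnt A j) *
            (2 : Int) ^ ((A.headD []).length - j - 1) := by
      intro acc j hj
      show (let num : Int := (List.range A.length).foldl (fun s i =>
        let row := A.getD i []
        s + (if row.getD j 0 == row.getD 0 0 then (1 : Int) else 0)) 0;
      acc + max ((A.length : Int) - num) num *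
        (2 : Int) ^ ((A.headD []).length - j - 1)) = _
      rw [hnum j]
    exact PySem.List.foldl_congr_mem _ _ _ _ hcong
  · refine congrArg (fun t => (2 : Int) ^ ((A.headD []).length - 1) * (A.length : Int) + t)
      (congrArg List.sum (List.map_congr_left ?_))
    intro j hj
    unfold pvTerm
    rw [Nat.sub_right_comm, max_comm]

-- ===== B-side lemmas =====
theorem pvSum_map_add {α : Type} (L : List α) (f g : α → Int) :
    (L.map (fun x => f x + g x)).sum = (L.map f).sum + (L.map g).sum := by
  induction L with
  | nil => simp
  | cons a t ih => simp [ih]; ring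

-- Horner's rule evaluates a row as a weighted column sum
theorem pvHorner (row : List Int) : ∀ (a : Int),
    row.foldl (fun v b => v * 2 + b) a =
      a * 2 ^ row.length +
        ((List.range row.length).map
          (fun j => row.getD j 0 * 2 ^ (row.length - 1 - j))).sum := by
  induction row with
  | nil => intro a; simp
  | cons b t ih =>
      intro a
      have h1 : List.range (t.length + 1) = 0 :: (List.range t.length).map Nat.succ :=
        List.range_succ_eq_map
      simp only [List.foldl_cons, ih (a * 2 + b), List.length_cons, h1, List.map_cons,
        List.map_map, List.sum_cons]
      have h2 : ∀ j, ((fun j => (b :: t).getD j 0 * 2 ^ (t.length + 1 - 1 - j)) ∘ Nat.succ) j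
          = t.getD j 0 * 2 ^ (t.length - 1 - j) := by
        intro j
        simp only [Function.comp]
        have e : t.length + 1 - 1 - Nat.succ j = t.length - 1 - j := by omega
        rw [e]
        rfl
      rw [List.map_congr_left (fun j _ => h2 j)]
      have hb : (b :: t).getD 0 0 = b := rfl
      rw [hb]
      have h0 : t.length + 1 - 1 - 0 = t.length := by omega
      rw [h0, pow_succ]
      ring

-- the column-j content of a column-j' flip (j' ≠ j) is unchanged
theorem pvColSum_set_ne (M : List (List Int)) (j j' : Nat) (v : List Int → Int)
    (h : j ≠ j') :
    pvColSum (M.map (fun row => row.set j (v row))) j' = pvColSum M j' := by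
  unfold pvColSum
  rw [List.map_map]
  refine congrArg List.sum (List.map_congr_left ?_)
  intro row _
  simp only [Function.comp]
  rw [List.getD_eq_getElem?_getD, List.getD_eq_getElem?_getD, List.getElem?_set_ne h]

-- flipping column j complements its count
theorem pvColSum_set_self (M : List (List Int)) (j c : Nat) (hj : j < c)
    (hlen : ∀ row ∈ M, row.length = c) :
    pvColSum (M.map (fun row => row.set j (1 - row.getD j 0))) j
      = (M.length : Int) - pvColSum M j := by
  unfold pvColSum
  rw [List.map_map]
  induction M with
  | nil => simp
  | cons r0 t ih =>
      have hr0 : r0.length = c := hlen r0 (by simp)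
      have hjr : j < r0.length := by omega
      have hset : (r0.set j (1 - r0.getD j 0)).getD j 0 = 1 - r0.getD j 0 := by
        rw [List.getD_eq_getElem?_getD, List.getElem?_set_self]
        · simp
        · exact hjr
      simp only [List.map_cons, List.sum_cons, Function.comp, hset]
      rw [ih (fun row hrow => hlen row (by simp [hrow]))]
      simp only [List.length_cons]
      push_cast
      ring

-- phase 2 as a whole: each column's final count is its (possibly complemented) initial count
theorem pvFoldFlip (rr : Int) (c : Nat) :
    ∀ (L : List Nat) (M : List (List Int)), L.Nodup → (∀ j ∈ L, j < c) →
      (∀ row ∈ M, row.length = c) →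
      (∀ row ∈ L.foldl (fun M j =>
          if (M.map (fun row => row.getD j 0)).sum * 2 < rr then
            M.map (fun row => row.set j (1 - row.getD j 0)) else M) M,
        row.length = c) ∧
      (L.foldl (fun M j =>
          if (M.map (fun row => row.getD j 0)).sum * 2 < rr then
            M.map (fun row => row.set j (1 - row.getD j 0)) else M) M).length
        = M.length ∧
      ∀ j, pvColSum (L.foldl (fun M j =>
          if (M.map (fun row => row.getD j 0)).sum * 2 < rr then
            M.map (fun row => row.set j (1 - row.getD j 0)) else M) M) j
        = if j ∈ L ∧ pvColSum M j * 2 < rr then (M.length : Int) - pvColSum M j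
          else pvColSum M j := by
  intro L
  induction L with
  | nil => intro M _ _ hlen; exact ⟨hlen, rfl, fun j => by simp⟩
  | cons a t ih =>
      intro M hnd hbound hlen
      have hat : a ∉ t := (List.nodup_cons.mp hnd).1
      have hndt : t.Nodup := (List.nodup_cons.mp hnd).2
      have hac : a < c := hbound a (by simp)
      rw [List.foldl_cons]
      set M1 := if (M.map (fun row => row.getD a 0)).sum * 2 < rr then
          M.map (fun row => row.set a (1 - row.getD a 0)) else M with hM1
      have hM1' : M1 = if pvColSum M a * 2 < rr then
          M.map (fun row => row.set a (1 - row.getD a 0)) else M := hM1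
      have hlen1 : ∀ row ∈ M1, row.length = c := by
        intro row hrow
        rw [hM1'] at hrow
        by_cases hcond : pvColSum M a * 2 < rr
        · rw [if_pos hcond] at hrow
          obtain ⟨row0, hrow0, rfl⟩ := List.mem_map.mp hrow
          rw [List.length_set]; exact hlen row0 hrow0
        · rw [if_neg hcond] at hrow; exact hlen row hrow
      have hlength1 : M1.length = M.length := by
        rw [hM1']
        by_cases hcond : pvColSum M a * 2 < rr
        · rw [if_pos hcond, List.length_map]
        · rw [if_neg hcond]
      have hcol1 : ∀ j, pvColSum M1 j =
          if j = a ∧ pvColSum M j * 2 < rr then (M.length : Int) - pvColSum M j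
          else pvColSum M j := by
        intro j
        rw [hM1']
        by_cases hcond : pvColSum M a * 2 < rr
        · rw [if_pos hcond]
          by_cases hja : j = a
          · subst hja
            rw [pvColSum_set_self M j c hac hlen, if_pos ⟨rfl, hcond⟩]
          · rw [pvColSum_set_ne M a j _ (fun h => hja h.symm),
              if_neg (fun h => hja h.1)]
        · rw [if_neg hcond]
          by_cases hja : j = a
          · subst hja
            rw [if_neg (fun h => hcond h.2)]
          · rw [if_neg (fun h => hja h.1)]
      obtain ⟨hfl, hflen, hfcol⟩ := ih M1 hndt (fun j hj => hbound j (by simp [hj])) hlen1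
      refine ⟨hfl, hflen.trans hlength1, ?_⟩
      intro j
      rw [hfcol j, hcol1 j, hlength1]
      by_cases hja : j = a
      · subst hja
        have hjt : j ∉ t := hat
        by_cases hcond : pvColSum M j * 2 < rr
        · rw [if_pos (show j = j ∧ pvColSum M j * 2 < rr from ⟨rfl, hcond⟩),
            if_neg (show ¬(j ∈ t ∧ ((M.length : Int) - pvColSum M j) * 2 < rr) from
              fun h => hjt h.1),
            if_pos (show j ∈ j :: t ∧ pvColSum M j * 2 < rr from ⟨by simp, hcond⟩)]
        · rw [if_neg (show ¬(j = j ∧ pvColSum M j * 2 < rr) from fun h => hcond h.2),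
            if_neg (show ¬(j ∈ t ∧ pvColSum M j * 2 < rr) from fun h => hjt h.1),
            if_neg (show ¬(j ∈ j :: t ∧ pvColSum M j * 2 < rr) from fun h => hcond h.2)]
      · rw [if_neg (show ¬(j = a ∧ pvColSum M j * 2 < rr) from fun h => hja h.1)]
        by_cases hjt : j ∈ t
        · by_cases hcond : pvColSum M j * 2 < rr
          · rw [if_pos (show j ∈ t ∧ pvColSum M j * 2 < rr from ⟨hjt, hcond⟩),
              if_pos (show j ∈ a :: t ∧ pvColSum M j * 2 < rr from ⟨by simp [hjt], hcond⟩)]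
          · rw [if_neg (show ¬(j ∈ t ∧ pvColSum M j * 2 < rr) from fun h => hcond h.2),
              if_neg (show ¬(j ∈ a :: t ∧ pvColSum M j * 2 < rr) from fun h => hcond h.2)]
        · rw [if_neg (show ¬(j ∈ t ∧ pvColSum M j * 2 < rr) from fun h => hjt h.1),
            if_neg (show ¬(j ∈ a :: t ∧ pvColSum M j * 2 < rr) from
              fun h => (List.mem_cons.mp h.1).elim hja hjt)]

-- the score of the flipped matrix, read row by row, is the weighted column-count sum
theorem pvScoreSwap (c : Nat) (w : Nat → Int) :
    ∀ (M : List (List Int)), (∀ row ∈ M, row.length = c) →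
      (M.map (fun row => ((List.range c).map (fun j => row.getD j 0 * w j)).sum)).sum
        = ((List.range c).map (fun j => pvColSum M j * w j)).sum := by
  intro M
  induction M with
  | nil =>
      intro _
      have : ∀ j ∈ List.range c, pvColSum ([] : List (List Int)) j * w j = 0 := by
        intro j _; simp [pvColSum]
      rw [List.map_congr_left this]
      simp
  | cons r0 t ih =>
      intro hlen
      have ht := ih (fun row hrow => hlen row (by simp [hrow]))
      simp only [List.map_cons, List.sum_cons, ht]
      have : ∀ j ∈ List.range c, pvColSum (r0 :: t) j * w j
          = r0.getD j 0 * w j + pvColSum t j * w j := by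
        intro j _
        simp only [pvColSum, List.map_cons, List.sum_cons]
        ring
      rw [List.map_congr_left this, pvSum_map_add]

theorem pvB_eq (A : List (List Int))
    (hall : ∀ row ∈ A, (A.headD []).length ≤ row.length) :
    matrixScore2_alt A =
      ((List.range' 0 (A.headD []).length).map
        (fun j => pvTerm A (A.headD []).length j)).sum := by
  set c := (A.headD []).length with hc
  set M0 : List (List Int) :=
    A.map (fun row => (row.take c).map (fun x => if x == row.headD 0 then (1 : Int) else 0))
    with hM0
  have hM0len : ∀ row ∈ M0, row.length = c := by
    intro row hrow
    rw [hM0] at hrow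
    obtain ⟨row0, hrow0, rfl⟩ := List.mem_map.mp hrow
    have := hall row0 hrow0
    simp only [List.length_map, List.length_take]
    omega
  have hM0length : M0.length = A.length := by rw [hM0]; simp
  have hcnt0 : ∀ j, j < c → pvColSum M0 j = pvCnt A j := by
    intro j hj
    unfold pvColSum pvCnt
    rw [hM0, List.map_map]
    refine congrArg List.sum (List.map_congr_left ?_)
    intro row hrow
    have hjr : j < row.length := lt_of_lt_of_le hj (hall row hrow)
    have hjn : j < ((row.take c).map (fun x => if x == row.headD 0 then (1 : Int) else 0)).length := by
      simp only [List.length_map, List.length_take]; omega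
    simp only [Function.comp]
    rw [List.getD_eq_getElem _ _ hjn, List.getElem_map, List.getElem_take,
      List.getD_eq_getElem _ _ hjr]
    simp only [pvHeadD_getD]
  -- the port's phase-2/3 pipeline, with the let in the step zeta-reduced (defeq)
  have hunf : matrixScore2_alt A =
      ((List.range c).foldl (fun M j =>
          if (M.map (fun row => row.getD j 0)).sum * 2 < ((A.length : Nat) : Int) then
            M.map (fun row => row.set j (1 - row.getD j 0)) else M) M0).foldl
        (fun res row => res + row.foldl (fun v b => v * 2 + b) 0) 0 := rfl
  rw [hunf]
  obtain ⟨hFlen, hFlength, hFcol⟩ :=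
    pvFoldFlip ((A.length : Nat) : Int) c (List.range c) M0
      (List.nodup_range) (fun j hj => List.mem_range.mp hj) hM0len
  set F := (List.range c).foldl (fun M j =>
      if (M.map (fun row => row.getD j 0)).sum * 2 < ((A.length : Nat) : Int) then
        M.map (fun row => row.set j (1 - row.getD j 0)) else M) M0 with hF
  have hB : F.foldl (fun res row => res + row.foldl (fun v b => v * 2 + b) 0) 0
      = (F.map (fun row => row.foldl (fun v b => v * 2 + b) 0)).sum :=
    (PySem.List.foldl_add F (fun row => row.foldl (fun v b => v * 2 + b) 0) 0).trans (by ring)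
  rw [hB]
  have hHorner : ∀ row ∈ F, row.foldl (fun v b => v * 2 + b) 0
      = ((List.range c).map (fun j => row.getD j 0 * (2 : Int) ^ (c - 1 - j))).sum := by
    intro row hrow
    rw [pvHorner row 0, hFlen row hrow]
    simp
  rw [List.map_congr_left hHorner,
    pvScoreSwap c (fun j => (2 : Int) ^ (c - 1 - j)) F hFlen,
    List.range_eq_range']
  refine congrArg List.sum (List.map_congr_left ?_)
  intro j hj
  have hjc : j < c := by
    have := List.mem_range'_1.mp hj; omega
  rw [hFcol j, hcnt0 j hjc, hM0length]
  unfold pvTerm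
  have hjr : j ∈ List.range c := List.mem_range.mpr hjc
  by_cases hcond : pvCnt A j * 2 < ((A.length : Nat) : Int)
  · rw [if_pos ⟨hjr, hcond⟩, max_eq_right (by omega)]
  · rw [if_neg (fun h => hcond h.2), max_eq_left (by omega)]

-- ===== VERDICT =====
theorem matrixScore2_spec : Claim_equal_matrixScore2 := by
  intro A _ hP
  obtain ⟨-, hc1, hall⟩ := hP
  show matrixScore2 A = matrixScore2_alt A
  rw [pvA_eq A, pvB_eq A hall]
  obtain ⟨k, hk⟩ : ∃ k, (A.headD []).length = k + 1 := ⟨(A.headD []).length - 1, by omega⟩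
  rw [hk]
  rw [show List.range' 0 (k + 1) = 0 :: List.range' 1 k from List.range'_succ]
  simp only [List.map_cons, List.sum_cons, Nat.add_sub_cancel]
  have h0 : pvTerm A (k + 1) 0 = (2 : Int) ^ k * A.length := by
    unfold pvTerm
    rw [pvCnt_zero, sub_self]
    rw [max_eq_left (by positivity), Nat.add_sub_cancel, Nat.sub_zero]
    ring
  rw [h0]
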